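-- pv_equiv track=rewrite | github.com/verath/advent-of-code-2025 | day4/day4.py | adjacent_eight
-- ===== SOURCE A (Python) =====
-- from typing import Tuple, Set, Generator, List
--
-- Coordinate = Tuple[int, int]
--
-- def adjacent_eight(
--     c: Coordinate, bounds: Coordinate
-- ) -> Generator[Coordinate, None, None]:
--     x_bounds, y_bounds = bounds
--     x_mid, y_mid = c
--     x_low = max(0, x_mid - 1)
--     x_high = min(x_bounds, x_mid + 1)
--     y_low = max(0, y_mid - 1)
--     y_high = min(y_bounds, y_mid + 1)
--
--     for x in range(x_low, x_high + 1):
--         for y in range(y_low, y_high + 1):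
--             if (x, y) == (x_mid, y_mid):
--                 continue
--             yield (x, y)
-- ===== SOURCE B (Python) =====
-- OFFSETS = ((-1, -1), (-1, 0), (-1, 1), (0, -1), (0, 1), (1, -1), (1, 0), (1, 1))
--
--
-- def adjacent_eight(c, bounds):
--     x_bounds, y_bounds = bounds
--     x_mid, y_mid = c
--     for dx, dy in OFFSETS:
--         nx, ny = x_mid + dx, y_mid + dy
--         if 0 <= nx <= x_bounds and 0 <= ny <= y_bounds:
--             yield (nx, ny)
-- ===== Notes on version B (the rewrite author's own statement) =====
-- stated objective: simpler
-- what changed: Replaced A's min/max range-clamping with nested range loops and a center-skip by one flat loop over the eight fixed offsets, keeping each candidate only if it passes the inclusive bounds check 0 <= n <= bound.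
import Mathlib
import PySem

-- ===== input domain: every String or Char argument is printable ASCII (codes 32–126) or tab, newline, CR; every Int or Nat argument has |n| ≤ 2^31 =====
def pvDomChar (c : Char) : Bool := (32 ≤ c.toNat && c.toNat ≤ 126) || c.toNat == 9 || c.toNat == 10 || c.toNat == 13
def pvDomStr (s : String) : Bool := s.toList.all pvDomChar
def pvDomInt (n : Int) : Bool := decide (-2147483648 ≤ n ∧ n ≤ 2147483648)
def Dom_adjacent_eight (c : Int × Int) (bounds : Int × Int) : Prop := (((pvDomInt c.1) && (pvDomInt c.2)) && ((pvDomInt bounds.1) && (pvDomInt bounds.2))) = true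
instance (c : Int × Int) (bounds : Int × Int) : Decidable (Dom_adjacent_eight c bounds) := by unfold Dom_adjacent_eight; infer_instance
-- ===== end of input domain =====

-- B replaces A's clamped nested range loops by one flat loop over the eight fixed
-- offsets with an inclusive bounds filter (objective: simpler; same output order).
-- Both Pythons are generators; equivalence is about the yielded sequence as a list.

-- ===== PORT A =====
def adjacent_eight (c : Int × Int) (bounds : Int × Int) : List (Int × Int) :=
  let x_bounds := bounds.1
  let y_bounds := bounds.2
  let x_mid := c.1
  let y_mid := c.2
  let x_low := max 0 (x_mid - 1)
  let x_high := min x_bounds (x_mid + 1)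
  let y_low := max 0 (y_mid - 1)
  let y_high := min y_bounds (y_mid + 1)
  (PySem.List.pyRange x_low (x_high + 1) 1).foldl (fun acc x =>
    (PySem.List.pyRange y_low (y_high + 1) 1).foldl (fun acc y =>
      if (x, y) = (x_mid, y_mid) then acc else acc ++ [(x, y)]) acc) []

-- ===== PORT B =====
def pvOffsets : List (Int × Int) :=
  [(-1, -1), (-1, 0), (-1, 1), (0, -1), (0, 1), (1, -1), (1, 0), (1, 1)]

def adjacent_eight_alt (c : Int × Int) (bounds : Int × Int) : List (Int × Int) :=
  let x_bounds := bounds.1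
  let y_bounds := bounds.2
  let x_mid := c.1
  let y_mid := c.2
  pvOffsets.foldl (fun acc d =>
    let nx := x_mid + d.1
    let ny := y_mid + d.2
    if (0 ≤ nx ∧ nx ≤ x_bounds) ∧ (0 ≤ ny ∧ ny ≤ y_bounds) then acc ++ [(nx, ny)]
    else acc) []

-- ===== PRECONDITION & SPEC =====
def Spec_adjacent_eight (c : Int × Int) (bounds : Int × Int) (out : List (Int × Int)) : Prop := out = adjacent_eight_alt c bounds
instance (c : Int × Int) (bounds : Int × Int) (out : List (Int × Int)) : Decidable (Spec_adjacent_eight c bounds out) := by unfold Spec_adjacent_eight; infer_instance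

-- ===== CLAIM (what is proved, stated in full; the proofs are below) =====
def Claim_equal_adjacent_eight : Prop := ∀ (c : Int × Int) (bounds : Int × Int), Dom_adjacent_eight c bounds → Spec_adjacent_eight c bounds (adjacent_eight c bounds)

-- ===== LEMMAS AND PROOFS =====

-- A's clamped range over one axis is exactly the three candidates m-1, m, m+1
-- filtered by the inclusive bounds 0 ≤ x ≤ B.
theorem pv_cand_eq (m B : Int) :
    PySem.List.pyRange (max 0 (m-1)) (min B (m+1) + 1) 1
      = List.filter (fun x => decide (0 ≤ x ∧ x ≤ B)) [m-1, m, m+1] := by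
  simp only [List.filter_cons, List.filter_nil, decide_eq_true_eq]
  by_cases hA : 0 ≤ m - 1 ∧ m - 1 ≤ B
  · by_cases hC : 0 ≤ m + 1 ∧ m + 1 ≤ B
    · rw [if_pos hA, if_pos (by omega : 0 ≤ m ∧ m ≤ B), if_pos hC,
        show max 0 (m-1) = m-1 by omega, show min B (m+1) = m+1 by omega,
        PySem.List.pyRange_one_cons (by omega), PySem.List.pyRange_one_cons (by omega),
        PySem.List.pyRange_one_cons (by omega), PySem.List.pyRange_one_eq_nil (by omega)]
      simp only [List.cons.injEq, and_true, true_and]; omega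
    · by_cases hB : 0 ≤ m ∧ m ≤ B
      · rw [if_pos hA, if_pos hB, if_neg hC,
          show max 0 (m-1) = m-1 by omega, show min B (m+1) = m by omega,
          PySem.List.pyRange_one_cons (by omega), PySem.List.pyRange_one_cons (by omega),
          PySem.List.pyRange_one_eq_nil (by omega)]
        simp only [List.cons.injEq, and_true, true_and]; omega
      · rw [if_pos hA, if_neg hB, if_neg hC,
          show max 0 (m-1) = m-1 by omega, show min B (m+1) = m-1 by omega,
          PySem.List.pyRange_one_cons (by omega), PySem.List.pyRange_one_eq_nil (by omega)]
  · by_cases hB : 0 ≤ m ∧ m ≤ B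
    · by_cases hC : 0 ≤ m + 1 ∧ m + 1 ≤ B
      · rw [if_neg hA, if_pos hB, if_pos hC,
          show max 0 (m-1) = m by omega, show min B (m+1) = m+1 by omega,
          PySem.List.pyRange_one_cons (by omega), PySem.List.pyRange_one_cons (by omega),
          PySem.List.pyRange_one_eq_nil (by omega)]
      · rw [if_neg hA, if_pos hB, if_neg hC,
          show max 0 (m-1) = m by omega, show min B (m+1) = m by omega,
          PySem.List.pyRange_one_cons (by omega), PySem.List.pyRange_one_eq_nil (by omega)]
    · by_cases hC : 0 ≤ m + 1 ∧ m + 1 ≤ B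
      · rw [if_neg hA, if_neg hB, if_pos hC,
          show max 0 (m-1) = m+1 by omega, show min B (m+1) = m+1 by omega,
          PySem.List.pyRange_one_cons (by omega), PySem.List.pyRange_one_eq_nil (by omega)]
      · rw [if_neg hA, if_neg hB, if_neg hC, PySem.List.pyRange_one_eq_nil (by omega)]

theorem pv_sub_ne (a : Int) : (a - 1 = a) = False := eq_false (by omega)

theorem pv_add_ne (a : Int) : (a + 1 = a) = False := eq_false (by omega)

set_option maxHeartbeats 4000000 in
theorem pv_main (c : Int × Int) (bounds : Int × Int) :
    adjacent_eight c bounds = adjacent_eight_alt c bounds := by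
  obtain ⟨xm, ym⟩ := c
  obtain ⟨xb, yb⟩ := bounds
  simp only [adjacent_eight]
  rw [pv_cand_eq xm xb, pv_cand_eq ym yb]
  by_cases hx1 : 0 ≤ xm - 1 ∧ xm - 1 ≤ xb <;>
  by_cases hx2 : 0 ≤ xm ∧ xm ≤ xb <;>
  by_cases hx3 : 0 ≤ xm + 1 ∧ xm + 1 ≤ xb <;>
  by_cases hy1 : 0 ≤ ym - 1 ∧ ym - 1 ≤ yb <;>
  by_cases hy2 : 0 ≤ ym ∧ ym ≤ yb <;>
  by_cases hy3 : 0 ≤ ym + 1 ∧ ym + 1 ≤ yb <;>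
  simp only [adjacent_eight_alt, pvOffsets, List.foldl_cons, List.foldl_nil,
    add_zero, ← sub_eq_add_neg, List.filter_cons, List.filter_nil, decide_eq_true_eq,
    hx1, hx2, hx3, hy1, hy2, hy3, and_true, and_false, and_self,
    if_true, if_false, Prod.mk.injEq, pv_sub_ne, pv_add_ne,
    List.cons_append, List.nil_append]

-- ===== VERDICT (by name: the statement is the Claim_ definition above) =====
theorem adjacent_eight_spec : Claim_equal_adjacent_eight := by
  intro c bounds _
  unfold Spec_adjacent_eight
  exact pv_main c bounds
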